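-- pv_equiv track=rewrite | github.com/psr/Advent-of-Code | 2025/day07.py | part_2
-- ===== SOURCE A (Python) =====
-- from collections import defaultdict
--
-- def part_2(parsed_input):
--     start, lines = parsed_input
--     timelines = defaultdict(int, {start: 1})
--     for splitters in lines:
--         # I feel like there's a better idiom for this, but I don't know it.
--         splitters_hit = {s: timelines.pop(s) for s in timelines.keys() & splitters}
--         for s, t in splitters_hit.items():
--             timelines[s - 1] += t
--             timelines[s + 1] += t
--     return sum(timelines.values())
-- ===== SOURCE B (Python) =====
-- def part_2(parsed_input):
--     start, lines = parsed_input
--     # forward pass: only the SET of reachable positions after each line (no counts)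
--     reach = [{start}]
--     cur = {start}
--     for splitters in lines:
--         cur = {q for p in cur for q in ((p - 1, p + 1) if p in splitters else (p,))}
--         reach.append(cur)
--     # backward pass: w[p] = number of final timelines one particle at p produces from here on
--     w = {p: 1 for p in reach[-1]}
--     for splitters, positions in zip(reversed(lines), reversed(reach[:-1])):
--         w = {p: (w[p - 1] + w[p + 1] if p in splitters else w[p]) for p in positions}
--     return w[start]
-- ===== Notes on version B (the rewrite author's own statement) =====
-- stated objective: alternative
-- what changed: B replaces A's forward simulation of a position->count dict by a two-phase backward dynamic program: a forward pass records only the set of reachable positions per line, then a backward pass over the lines computes for each reachable position the number of final timelines a single particle there produces, and the answer is read off at the start position (no counts are ever propagated forward).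
import Mathlib
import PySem

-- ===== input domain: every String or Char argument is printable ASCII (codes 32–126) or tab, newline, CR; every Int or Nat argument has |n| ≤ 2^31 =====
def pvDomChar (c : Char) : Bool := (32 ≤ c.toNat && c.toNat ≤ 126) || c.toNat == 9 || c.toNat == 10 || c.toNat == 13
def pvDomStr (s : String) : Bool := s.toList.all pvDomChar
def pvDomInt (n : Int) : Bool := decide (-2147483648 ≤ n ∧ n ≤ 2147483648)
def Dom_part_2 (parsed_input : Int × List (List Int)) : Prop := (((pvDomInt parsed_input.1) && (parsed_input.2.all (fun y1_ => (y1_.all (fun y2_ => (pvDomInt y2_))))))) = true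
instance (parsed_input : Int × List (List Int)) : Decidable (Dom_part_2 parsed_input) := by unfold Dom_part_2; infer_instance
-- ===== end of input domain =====

-- B replaces A's forward count simulation by a two-phase backward dynamic program (forward
-- reachable-position sets, then backward per-position timeline counts, answer read at the
-- start position); objective: alternative.  A mutates only its local dict; return values are
-- what is compared.

-- ===== PORT A =====
-- one `timelines[j] += t` pair of the defaultdict
def pvIncA (d : PySem.Dict Int Int) (p : Int × Int) : PySem.Dict Int Int :=
  (d.modify (p.1 - 1) 0 (· + p.2)).modify (p.1 + 1) 0 (· + p.2)

-- Body of A's outer loop.  Python iterates `timelines.keys() & splitters` (a set) in unspecified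
-- order; the pops of the dict comprehension are rendered in insertion order as one filter — they
-- remove exactly the hit keys and record exactly their counts, and the summed result is
-- order-independent.
def pvStepA (tl : PySem.Dict Int Int) (splitters : List Int) : PySem.Dict Int Int :=
  let hit := tl.items.filter (fun p => splitters.contains p.1)      -- splitters_hit = {s: timelines.pop(s) …}
  let rest : PySem.Dict Int Int := PySem.Dict.mk (tl.items.filter (fun p => !splitters.contains p.1))
  hit.foldl pvIncA rest                                             -- for s, t in splitters_hit.items(): …

def part_2 (parsed_input : Int × List (List Int)) : Int :=
  (parsed_input.2.foldl pvStepA (PySem.Dict.ofList [(parsed_input.1, 1)])).values.sum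

-- ===== PORT B =====
-- {q for p in cur for q in ((p - 1, p + 1) if p in splitters else (p,))}
def pvReachStep (cur : PySem.Set Int) (splitters : List Int) : PySem.Set Int :=
  cur.foldl (fun acc p =>
    if splitters.contains p then PySem.Set.add (PySem.Set.add acc (p - 1)) (p + 1)
    else PySem.Set.add acc p) PySem.Set.empty

-- loop body of the forward pass: cur = {…}; reach.append(cur)
def pvFwdStep (st : List (PySem.Set Int) × PySem.Set Int) (splitters : List Int) :
    List (PySem.Set Int) × PySem.Set Int :=
  let c := pvReachStep st.2 splitters
  (st.1 ++ [c], c)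

-- one backward dict comprehension {p: (w[p-1] + w[p+1] if p in splitters else w[p]) for p in positions};
-- the w[x] lookups are rendered total with get?/getD 0: every position looked up is reachable at the
-- next stage (proved below), so the Python lookup never raises
def pvBackStep (w : PySem.Dict Int Int) (pr : List Int × PySem.Set Int) : PySem.Dict Int Int :=
  pr.2.foldl (fun d p =>
    d.insert p (if pr.1.contains p then (w.get? (p - 1)).getD 0 + (w.get? (p + 1)).getD 0
                else (w.get? p).getD 0)) PySem.Dict.empty

def part_2_alt (parsed_input : Int × List (List Int)) : Int :=
  let start := parsed_input.1
  let lines := parsed_input.2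
  let st := lines.foldl pvFwdStep ([PySem.Set.ofList [start]], PySem.Set.ofList [start])
  let reach := st.1
  -- w = {p: 1 for p in reach[-1]}; reach is never empty, so reach[-1] is rendered getLast?.getD []
  let w0 : PySem.Dict Int Int :=
    (reach.getLast?.getD []).foldl (fun d p => d.insert p 1) PySem.Dict.empty
  let w := (lines.reverse.zip reach.dropLast.reverse).foldl pvBackStep w0
  (w.get? start).getD 0      -- w[start]; start is reachable at stage 0, so this never raises

-- ===== PRECONDITION & SPEC =====
def Spec_part_2 (parsed_input : Int × List (List Int)) (out : Int) : Prop := out = part_2_alt parsed_input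
instance (parsed_input : Int × List (List Int)) (out : Int) : Decidable (Spec_part_2 parsed_input out) := by unfold Spec_part_2; infer_instance

-- ===== CLAIM (what is proved, stated in full; the proofs are below) =====
def Claim_equal_part_2 : Prop := ∀ (parsed_input : Int × List (List Int)), Dom_part_2 parsed_input → Spec_part_2 parsed_input (part_2 parsed_input)

-- ===== LEMMAS AND PROOFS =====

-- number of final timelines a single particle at position p produces under `lines`
def pvF : List (List Int) → Int → Int
  | [], _ => 1
  | sp :: t, p => if sp.contains p then pvF t (p - 1) + pvF t (p + 1) else pvF t p

-- weighted sum of an items list against a per-position weight g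
def pvSum (l : List (Int × Int)) (g : Int → Int) : Int :=
  (l.map (fun p => p.2 * g p.1)).sum

theorem pvNDmod (d : PySem.Dict Int Int) (k d0 : Int) (f : Int → Int) (h : d.keys.Nodup) :
    (d.modify k d0 f).keys.Nodup := by
  rw [PySem.Dict.keys_modify]
  exact PySem.Dict.nodup_keys_insert _ _ _ h

-- ---- A side: the forward fold computes the pvSum of the initial dict against pvF ----

theorem pvSum_append (l1 l2 : List (Int × Int)) (g : Int → Int) :
    pvSum (l1 ++ l2) g = pvSum l1 g + pvSum l2 g := by
  simp [pvSum]

-- replacing the unique pair with key k by (k, v) shifts the weighted sum by (v - u) * g k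
theorem pvSum_replace (l : List (Int × Int)) (k u v : Int) (g : Int → Int)
    (h : (l.map Prod.fst).Nodup) (hm : (k, u) ∈ l) :
    pvSum (l.map (fun p => if p.1 == k then (k, v) else p)) g
      = pvSum l g - u * g k + v * g k := by
  induction l with
  | nil => cases hm
  | cons a l ih =>
    simp only [List.map_cons, List.nodup_cons] at h
    by_cases hk : a.1 = k
    · have ha : a = (k, u) := by
        rcases List.mem_cons.mp hm with he | hl
        · exact he.symm
        · exact absurd (hk ▸ List.mem_map_of_mem (f := Prod.fst) hl) h.1
      have hfree : ∀ p ∈ l, (p.1 == k) = false := by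
        intro p hp
        have hne : p.1 ≠ k := fun he => h.1 (hk ▸ he ▸ List.mem_map_of_mem (f := Prod.fst) hp)
        simpa using hne
      subst ha
      simp only [List.map_cons, beq_self_eq_true, if_true]
      rw [List.map_congr_left (fun p hp => by rw [if_neg (by simp [hfree p hp])])]
      simp only [pvSum, List.map_cons, List.sum_cons, List.map_id_fun', id_eq]
      ring
    · have hb : (a.1 == k) = false := by simpa using hk
      have hml : (k, u) ∈ l := by
        rcases List.mem_cons.mp hm with he | hl
        · exact absurd (congrArg Prod.fst he.symm) hk
        · exact hl
      simp only [List.map_cons, hb, Bool.false_eq_true, if_false]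
      simp only [pvSum, List.map_cons, List.sum_cons] at *
      rw [ih h.2 hml]
      ring

theorem pvSum_modify_d (d : PySem.Dict Int Int) (k t : Int) (g : Int → Int)
    (h : d.keys.Nodup) :
    pvSum (d.modify k 0 (· + t)).items g = pvSum d.items g + t * g k := by
  have hmod : d.modify k 0 (· + t) = d.insert k (d.getD k 0 + t) := rfl
  rw [hmod]
  by_cases hc : d.contains k = true
  · have hsome : (d.get? k).isSome := by rw [← PySem.Dict.contains_eq_isSome_get?, hc]
    obtain ⟨u, hu⟩ := Option.isSome_iff_exists.mp hsome
    have hmem : (k, u) ∈ d.items := PySem.Dict.mem_items_of_get?_eq_some _ hu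
    have hgd : d.getD k 0 = u := by rw [PySem.Dict.getD_eq_get?_getD, hu]; rfl
    rw [PySem.Dict.items_insert_of_contains _ _ hc]
    rw [pvSum_replace d.items k u (d.getD k 0 + t) g h hmem, hgd]
    ring
  · have hc' : d.contains k = false := by simpa using hc
    rw [PySem.Dict.items_insert_of_not_contains _ _ hc',
      PySem.Dict.getD_of_not_contains _ _ hc', pvSum_append]
    simp [pvSum]

theorem pvSum_incA (d : PySem.Dict Int Int) (q : Int × Int) (g : Int → Int)
    (h : d.keys.Nodup) :
    pvSum (pvIncA d q).items g
      = pvSum d.items g + q.2 * (g (q.1 - 1) + g (q.1 + 1)) := by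
  unfold pvIncA
  rw [pvSum_modify_d _ _ _ _ (pvNDmod _ _ _ _ h), pvSum_modify_d _ _ _ _ h]
  ring

theorem pvIncA_nodup (d : PySem.Dict Int Int) (q : Int × Int) (h : d.keys.Nodup) :
    (pvIncA d q).keys.Nodup := pvNDmod _ _ _ _ (pvNDmod _ _ _ _ h)

theorem pvSum_foldA (hits : List (Int × Int)) (d : PySem.Dict Int Int) (g : Int → Int)
    (h : d.keys.Nodup) :
    pvSum (hits.foldl pvIncA d).items g
      = pvSum d.items g + (hits.map (fun q => q.2 * (g (q.1 - 1) + g (q.1 + 1)))).sum := by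
  induction hits generalizing d with
  | nil => simp
  | cons q hits ih =>
    rw [List.foldl_cons, ih _ (pvIncA_nodup d q h), pvSum_incA d q g h]
    simp only [List.map_cons, List.sum_cons]
    ring

theorem pvFoldA_nodup (hits : List (Int × Int)) (d : PySem.Dict Int Int) (h : d.keys.Nodup) :
    (hits.foldl pvIncA d).keys.Nodup := by
  induction hits generalizing d with
  | nil => exact h
  | cons q hits ih => exact ih _ (pvIncA_nodup d q h)

theorem pvSum_filter_partition (l : List (Int × Int)) (q : Int × Int → Bool) (g : Int → Int) :
    pvSum l g = pvSum (l.filter q) g + pvSum (l.filter (fun p => !q p)) g := by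
  induction l with
  | nil => simp [pvSum]
  | cons a l ih =>
    by_cases hq : q a = true
    · simp only [pvSum, List.filter_cons, hq, List.map_cons, List.sum_cons] at *
      simp [ih]
      ring
    · simp only [Bool.not_eq_true] at hq
      simp only [pvSum, List.filter_cons, hq, List.map_cons, List.sum_cons] at *
      simp [ih]
      ring

theorem pvStepA_rest_nodup (tl : PySem.Dict Int Int) (splitters : List Int)
    (h : tl.keys.Nodup) :
    (PySem.Dict.mk (tl.items.filter (fun p => !splitters.contains p.1))).keys.Nodup := by
  have hsub : ((tl.items.filter (fun p => !splitters.contains p.1)).map Prod.fst).Sublist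
      (tl.items.map Prod.fst) := List.Sublist.map Prod.fst List.filter_sublist
  exact hsub.nodup h

theorem pvStepA_sum (d : PySem.Dict Int Int) (sp : List Int) (g : Int → Int)
    (h : d.keys.Nodup) :
    pvSum (pvStepA d sp).items g
      = pvSum d.items (fun p => if sp.contains p then g (p - 1) + g (p + 1) else g p) := by
  unfold pvStepA
  rw [pvSum_foldA _ _ _ (pvStepA_rest_nodup d sp h)]
  rw [pvSum_filter_partition d.items (fun p => sp.contains p.1)]
  have e1 : pvSum (d.items.filter (fun p => sp.contains p.1))
        (fun p => if sp.contains p then g (p - 1) + g (p + 1) else g p)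
      = ((d.items.filter (fun p => sp.contains p.1)).map
          (fun q => q.2 * (g (q.1 - 1) + g (q.1 + 1)))).sum := by
    unfold pvSum
    congr 1
    apply List.map_congr_left
    intro p hp
    rw [List.mem_filter] at hp
    show p.2 * (if sp.contains p.1 = true then g (p.1 - 1) + g (p.1 + 1) else g p.1) = _
    rw [if_pos hp.2]
  have e2 : pvSum (d.items.filter (fun p => !sp.contains p.1))
        (fun p => if sp.contains p then g (p - 1) + g (p + 1) else g p)
      = pvSum (d.items.filter (fun p => !sp.contains p.1)) g := by
    unfold pvSum
    congr 1
    apply List.map_congr_left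
    intro p hp
    rw [List.mem_filter] at hp
    have hf : sp.contains p.1 = false := by simpa using hp.2
    show p.2 * (if sp.contains p.1 = true then g (p.1 - 1) + g (p.1 + 1) else g p.1) = _
    rw [if_neg (fun hh => by rw [hf] at hh; cases hh)]
  rw [e1, e2]
  have : (PySem.Dict.mk (d.items.filter (fun p => !sp.contains p.1))).items
      = d.items.filter (fun p => !sp.contains p.1) := rfl
  rw [this]
  ring

theorem pvStepA_nodup (d : PySem.Dict Int Int) (sp : List Int) (h : d.keys.Nodup) :
    (pvStepA d sp).keys.Nodup := by
  unfold pvStepA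
  exact pvFoldA_nodup _ _ (pvStepA_rest_nodup d sp h)

theorem pvPartA (lines : List (List Int)) (d : PySem.Dict Int Int) (h : d.keys.Nodup) :
    (lines.foldl pvStepA d).values.sum = pvSum d.items (pvF lines) := by
  induction lines generalizing d with
  | nil =>
    show (d.items.map (fun p => p.2)).sum = _
    unfold pvSum
    simp [pvF]
  | cons sp t ih =>
    rw [List.foldl_cons, ih _ (pvStepA_nodup d sp h), pvStepA_sum d sp _ h]
    rfl

-- ---- B side: the two passes compute pvF at the start position ----

-- spine of the forward pass
def pvRL (c : PySem.Set Int) : List (List Int) → List (PySem.Set Int)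
  | [] => []
  | sp :: t => pvReachStep c sp :: pvRL (pvReachStep c sp) t

def pvRLast (c : PySem.Set Int) : List (List Int) → PySem.Set Int
  | [] => c
  | sp :: t => pvRLast (pvReachStep c sp) t

theorem pvRL_length (lines : List (List Int)) (c : PySem.Set Int) :
    (pvRL c lines).length = lines.length := by
  induction lines generalizing c with
  | nil => rfl
  | cons sp t ih => simp [pvRL, ih]

theorem pvFwd_eq (lines : List (List Int)) (acc : List (PySem.Set Int)) (c : PySem.Set Int) :
    lines.foldl pvFwdStep (acc, c) = (acc ++ pvRL c lines, pvRLast c lines) := by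
  induction lines generalizing acc c with
  | nil => simp [pvRL, pvRLast]
  | cons sp t ih =>
    rw [List.foldl_cons]
    show t.foldl pvFwdStep (acc ++ [pvReachStep c sp], pvReachStep c sp) = _
    rw [ih]
    simp [pvRL, pvRLast]

theorem pvLast_eq (lines : List (List Int)) (c : PySem.Set Int) :
    ((c :: pvRL c lines).getLast?.getD []) = pvRLast c lines := by
  induction lines generalizing c with
  | nil => rfl
  | cons sp t ih =>
    show ((c :: pvReachStep c sp :: pvRL (pvReachStep c sp) t).getLast?.getD []) = _
    rw [List.getLast?_cons_cons]
    exact ih (pvReachStep c sp)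

theorem pvPairs_eq (lines : List (List Int)) (c : PySem.Set Int) :
    lines.reverse.zip ((c :: pvRL c lines).dropLast.reverse)
      = (lines.zip (c :: pvRL c lines)).reverse := by
  induction lines generalizing c with
  | nil => rfl
  | cons sp t ih =>
    have hrl : pvRL c (sp :: t) = pvReachStep c sp :: pvRL (pvReachStep c sp) t := rfl
    rw [hrl, List.reverse_cons, List.zip_cons_cons, List.reverse_cons]
    have hdl : (c :: pvReachStep c sp :: pvRL (pvReachStep c sp) t).dropLast
        = c :: (pvReachStep c sp :: pvRL (pvReachStep c sp) t).dropLast := rfl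
    rw [hdl, List.reverse_cons]
    have hlen : t.reverse.length
        = ((pvReachStep c sp :: pvRL (pvReachStep c sp) t).dropLast.reverse).length := by
      simp [pvRL_length]
    rw [List.zip_append hlen, ih (pvReachStep c sp)]
    rfl

-- the fold body of pvReachStep, named for the proofs
def pvRSf (sp : List Int) (acc : PySem.Set Int) (p : Int) : PySem.Set Int :=
  if sp.contains p then PySem.Set.add (PySem.Set.add acc (p - 1)) (p + 1)
  else PySem.Set.add acc p

theorem pvReachStep_eq (c : PySem.Set Int) (sp : List Int) :
    pvReachStep c sp = c.foldl (pvRSf sp) PySem.Set.empty := rfl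

-- membership is monotone along the reach fold
theorem pvReach_mono (sp : List Int) (c : List Int) (acc : PySem.Set Int) (x : Int)
    (hx : x ∈ acc) : x ∈ c.foldl (pvRSf sp) acc := by
  induction c generalizing acc with
  | nil => exact hx
  | cons a c ih =>
    rw [List.foldl_cons]
    apply ih
    unfold pvRSf
    by_cases hs : sp.contains a = true
    · rw [if_pos hs, PySem.Set.mem_add, PySem.Set.mem_add]
      exact Or.inl (Or.inl hx)
    · rw [if_neg hs, PySem.Set.mem_add]
      exact Or.inl hx

theorem pvReach_mem (sp : List Int) (c : List Int) (acc : PySem.Set Int) (p : Int)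
    (hp : p ∈ c) :
    (sp.contains p = true →
      (p - 1) ∈ c.foldl (pvRSf sp) acc ∧ (p + 1) ∈ c.foldl (pvRSf sp) acc)
    ∧ (sp.contains p = false → p ∈ c.foldl (pvRSf sp) acc) := by
  induction c generalizing acc with
  | nil => cases hp
  | cons a c ih =>
    rcases List.mem_cons.mp hp with h | h
    · subst h
      constructor
      · intro hs
        rw [List.foldl_cons]
        constructor
        · apply pvReach_mono
          unfold pvRSf
          rw [if_pos hs, PySem.Set.mem_add, PySem.Set.mem_add]
          exact Or.inl (Or.inr rfl)
        · apply pvReach_mono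
          unfold pvRSf
          rw [if_pos hs, PySem.Set.mem_add]
          exact Or.inr rfl
      · intro hs
        rw [List.foldl_cons]
        apply pvReach_mono
        unfold pvRSf
        rw [if_neg (fun hh => by rw [hs] at hh; cases hh), PySem.Set.mem_add]
        exact Or.inr rfl
    · rw [List.foldl_cons]
      exact ih _ h

theorem pvReachStep_mem_split (sp : List Int) (c : PySem.Set Int) (p : Int)
    (hp : p ∈ c) (hs : sp.contains p = true) :
    (p - 1) ∈ pvReachStep c sp ∧ (p + 1) ∈ pvReachStep c sp := by
  rw [pvReachStep_eq]
  exact (pvReach_mem sp c PySem.Set.empty p hp).1 hs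

theorem pvReachStep_mem_keep (sp : List Int) (c : PySem.Set Int) (p : Int)
    (hp : p ∈ c) (hs : sp.contains p = false) :
    p ∈ pvReachStep c sp := by
  rw [pvReachStep_eq]
  exact (pvReach_mem sp c PySem.Set.empty p hp).2 hs

-- get? of a dict comprehension keyed by a list (the value depends only on the key)
theorem pvGet?_build (positions : List Int) (v : Int → Int) (d : PySem.Dict Int Int) (p : Int) :
    ((positions.foldl (fun d q => d.insert q (v q)) d).get? p)
      = if p ∈ positions then some (v p) else d.get? p := by
  induction positions generalizing d with
  | nil => simp
  | cons q t ih =>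
    rw [List.foldl_cons]
    show (List.foldl (fun d q => d.insert q (v q)) (d.insert q (v q)) t).get? p = _
    rw [ih]
    by_cases ht : p ∈ t
    · simp [ht]
    · by_cases hq : p = q
      · subst hq
        simp [ht, PySem.Dict.get?_insert_self]
      · rw [if_neg ht, if_neg (by simp [ht, hq]), PySem.Dict.get?_insert, if_neg hq]

theorem pvBackLoop (lines : List (List Int)) (c : PySem.Set Int) (w0 : PySem.Dict Int Int)
    (hw : ∀ p ∈ pvRLast c lines, w0.get? p = some 1) :
    ∀ p ∈ c, (((lines.zip (c :: pvRL c lines)).reverse).foldl pvBackStep w0).get? p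
      = some (pvF lines p) := by
  induction lines generalizing c with
  | nil =>
    intro p hp
    simpa [pvF] using hw p hp
  | cons sp t ih =>
    intro p hp
    have hz : ((sp :: t).zip (c :: pvRL c (sp :: t))).reverse
        = (t.zip (pvReachStep c sp :: pvRL (pvReachStep c sp) t)).reverse ++ [(sp, c)] := by
      show ((sp, c) :: t.zip (pvReachStep c sp :: pvRL (pvReachStep c sp) t)).reverse = _
      rw [List.reverse_cons]
    rw [hz, List.foldl_append, List.foldl_cons, List.foldl_nil]
    have hW := ih (pvReachStep c sp) (fun q hq => hw q hq)
    have hb : pvBackStep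
          ((t.zip (pvReachStep c sp :: pvRL (pvReachStep c sp) t)).reverse.foldl pvBackStep w0)
          (sp, c)
        = c.foldl (fun d q => d.insert q
            (if sp.contains q then
              (((t.zip (pvReachStep c sp :: pvRL (pvReachStep c sp) t)).reverse.foldl
                  pvBackStep w0).get? (q - 1)).getD 0
              + (((t.zip (pvReachStep c sp :: pvRL (pvReachStep c sp) t)).reverse.foldl
                  pvBackStep w0).get? (q + 1)).getD 0
             else (((t.zip (pvReachStep c sp :: pvRL (pvReachStep c sp) t)).reverse.foldl
                  pvBackStep w0).get? q).getD 0))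
            PySem.Dict.empty := rfl
    rw [hb, pvGet?_build, if_pos hp]
    by_cases hs : sp.contains p = true
    · obtain ⟨h1, h2⟩ := pvReachStep_mem_split sp c p hp hs
      rw [if_pos hs, hW (p - 1) h1, hW (p + 1) h2]
      show _ = some (if sp.contains p = true then pvF t (p - 1) + pvF t (p + 1) else pvF t p)
      rw [if_pos hs]
      rfl
    · have hs' : sp.contains p = false := by simpa using hs
      rw [if_neg (fun hh => by rw [hs'] at hh; cases hh),
        hW p (pvReachStep_mem_keep sp c p hp hs')]
      show _ = some (if sp.contains p = true then pvF t (p - 1) + pvF t (p + 1) else pvF t p)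
      rw [if_neg (fun hh => by rw [hs'] at hh; cases hh)]
      rfl

theorem pvPartB (parsed_input : Int × List (List Int)) :
    part_2_alt parsed_input = pvF parsed_input.2 parsed_input.1 := by
  obtain ⟨start, lines⟩ := parsed_input
  show (((lines.reverse.zip
      ((lines.foldl pvFwdStep ([PySem.Set.ofList [start]], PySem.Set.ofList [start])).1.dropLast.reverse)).foldl
        pvBackStep
        (((lines.foldl pvFwdStep ([PySem.Set.ofList [start]], PySem.Set.ofList [start])).1.getLast?.getD []).foldl
          (fun d p => d.insert p 1) PySem.Dict.empty)).get? start).getD 0 = pvF lines start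
  rw [pvFwd_eq]
  have hcons : ([PySem.Set.ofList [start]] ++ pvRL (PySem.Set.ofList [start]) lines,
        pvRLast (PySem.Set.ofList [start]) lines).1
      = PySem.Set.ofList [start] :: pvRL (PySem.Set.ofList [start]) lines := rfl
  rw [hcons, pvLast_eq, pvPairs_eq]
  have hw : ∀ p ∈ pvRLast (PySem.Set.ofList [start]) lines,
      ((pvRLast (PySem.Set.ofList [start]) lines).foldl
        (fun d p => d.insert p 1) (PySem.Dict.empty : PySem.Dict Int Int)).get? p = some 1 := by
    intro p hp
    have h := pvGet?_build (pvRLast (PySem.Set.ofList [start]) lines) (fun _ => (1 : Int))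
      PySem.Dict.empty p
    rw [if_pos hp] at h
    exact h
  have hmem : start ∈ (PySem.Set.ofList [start] : PySem.Set Int) := by
    show start ∈ [start]
    exact List.mem_singleton.mpr rfl
  rw [pvBackLoop lines (PySem.Set.ofList [start]) _ hw start hmem]
  rfl

-- ===== VERDICT (by name: the statement is the Claim_ definition above) =====
theorem part_2_spec : Claim_equal_part_2 := by
  intro parsed_input _
  unfold Spec_part_2
  rw [pvPartB]
  show (parsed_input.2.foldl pvStepA (PySem.Dict.ofList [(parsed_input.1, 1)])).values.sum = _
  have hnd : (PySem.Dict.ofList [(parsed_input.1, (1 : Int))]).keys.Nodup := by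
    show ([(parsed_input.1, (1 : Int))].map Prod.fst).Nodup
    simp
  rw [pvPartA _ _ hnd]
  show pvSum [(parsed_input.1, 1)] (pvF parsed_input.2) = _
  simp [pvSum]
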